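-- pv_equiv track=rewrite | github.com/freeword2020/sengent | src/sentieon_assist/eval_trace_plane.py | _aggregate_trust_boundary_audit_posture
-- ===== SOURCE A (Python) =====
-- from typing import Any, Mapping, Sequence
--
-- def _aggregate_trust_boundary_audit_posture(items: Sequence[Mapping[str, Any]]) -> str:
--     postures = {
--         str(item.get("trust_boundary_audit_posture", "")).strip()
--         for item in items
--         if str(item.get("trust_boundary_audit_posture", "")).strip()
--     }
--     if not postures:
--         return ""
--     if len(postures) == 1:
--         return next(iter(postures))
--     return "mixed"
-- ===== SOURCE B (Python) =====
-- def _aggregate_trust_boundary_audit_posture(items):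
--     seen = None
--     mixed = False
--     for item in items:
--         p = str(item.get("trust_boundary_audit_posture", "")).strip()
--         if not p:
--             continue
--         if seen is None:
--             seen = p
--         elif p != seen:
--             mixed = True
--     if seen is None:
--         return ""
--     return "mixed" if mixed else seen
-- ===== Notes on version B (the rewrite author's own statement) =====
-- stated objective: alternative
-- what changed: Replaces the set comprehension plus cardinality test with a single pass that maintains one 'seen' value and a 'mixed' flag, so no set is ever built.
import Mathlib
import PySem

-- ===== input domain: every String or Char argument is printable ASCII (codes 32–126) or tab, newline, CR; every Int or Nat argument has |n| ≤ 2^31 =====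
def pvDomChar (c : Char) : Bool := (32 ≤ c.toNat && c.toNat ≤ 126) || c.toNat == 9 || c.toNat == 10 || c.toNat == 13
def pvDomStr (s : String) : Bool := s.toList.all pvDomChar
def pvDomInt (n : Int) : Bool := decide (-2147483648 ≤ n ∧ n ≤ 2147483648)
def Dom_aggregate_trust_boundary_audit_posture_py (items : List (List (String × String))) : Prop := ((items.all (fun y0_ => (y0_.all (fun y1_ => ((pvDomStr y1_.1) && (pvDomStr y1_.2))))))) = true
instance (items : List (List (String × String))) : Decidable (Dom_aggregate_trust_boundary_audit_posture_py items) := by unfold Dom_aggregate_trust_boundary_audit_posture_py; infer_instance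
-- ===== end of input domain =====

-- B replaces A's set comprehension + cardinality test by a single pass keeping one seen value and a mixed flag (alternative decomposition, same cost).


-- shared helper: str(item.get("trust_boundary_audit_posture", "")).strip()
def pvPosture (item : List (String × String)) : String :=
  PySem.Str.strip (PySem.Dict.getD (⟨item⟩ : PySem.Dict String String) "trust_boundary_audit_posture" "")

-- ===== PORT A =====
def aggregate_trust_boundary_audit_posture_py (items : List (List (String × String))) : String :=
  let postures : PySem.Set String :=
    PySem.Set.ofList (items.filterMap (fun item =>
      let p := pvPosture item
      if p = "" then none else some p))
  match postures with
  | [] => ""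
  | [v] => v
  | _ => "mixed"

-- ===== PORT B =====
def aggregate_trust_boundary_audit_posture_py_alt (items : List (List (String × String))) : String :=
  let st := items.foldl (fun (st : Option String × Bool) item =>
    let p := pvPosture item
    if p = "" then st
    else match st with
      | (none, m) => (some p, m)
      | (some s, m) => (some s, m || (p ≠ s : Bool))) (none, false)
  match st with
  | (none, _) => ""
  | (some v, m) => if m then "mixed" else v

-- ===== PRECONDITION & SPEC =====
def Spec_aggregate_trust_boundary_audit_posture_py (items : List (List (String × String))) (out : String) : Prop := out = aggregate_trust_boundary_audit_posture_py_alt items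
instance (items : List (List (String × String))) (out : String) : Decidable (Spec_aggregate_trust_boundary_audit_posture_py items out) := by unfold Spec_aggregate_trust_boundary_audit_posture_py; infer_instance

-- ===== CLAIM (what is proved, stated in full; the proofs are below) =====
def Claim_equal_aggregate_trust_boundary_audit_posture_py : Prop := ∀ (items : List (List (String × String))), Dom_aggregate_trust_boundary_audit_posture_py items → Spec_aggregate_trust_boundary_audit_posture_py items (aggregate_trust_boundary_audit_posture_py items)

-- ===== LEMMAS AND PROOFS =====

def pvG : Option String × Bool → String → Option String × Bool :=
  fun st p => match st with
    | (none, m) => (some p, m)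
    | (some s, m) => (some s, m || (p ≠ s : Bool))

def pvF (item : List (String × String)) : Option String :=
  let p := pvPosture item
  if p = "" then none else some p

theorem foldB_to_list (l : List (List (String × String))) (st : Option String × Bool) :
    l.foldl (fun st item => match pvF item with | none => st | some p => pvG st p) st
      = (l.filterMap pvF).foldl pvG st := by
  induction l generalizing st with
  | nil => rfl
  | cons a rest ih => cases h : pvF a <;> simp [h, ih]

theorem stepB_eq :
    (fun (st : Option String × Bool) (item : List (String × String)) =>
      let p := pvPosture item
      if p = "" then st
      else match st with
        | (none, m) => (some p, m)
        | (some s, m) => (some s, m || (p ≠ s : Bool)))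
      = (fun st item => match pvF item with | none => st | some p => pvG st p) := by
  funext st item
  simp only [pvF, pvG]
  by_cases h : pvPosture item = "" <;> simp [h]

theorem foldG_some (xs : List String) (a : String) (m : Bool) :
    xs.foldl pvG (some a, m) = (some a, m || xs.any (fun p => (p ≠ a : Bool))) := by
  induction xs generalizing m with
  | nil => simp
  | cons x rest ih => simp [pvG, ih, Bool.or_assoc]

theorem add_cons (s : List String) (a x : String) :
    PySem.Set.add (a :: s) x = a :: (if x = a then s else PySem.Set.add s x) := by
  by_cases hxa : x = a
  · simp [PySem.Set.add, PySem.Set.contains, hxa]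
  · by_cases hs : x ∈ s
    · simp [PySem.Set.add, PySem.Set.contains, hxa, hs]
    · simp [PySem.Set.add, PySem.Set.contains, hxa, hs]

theorem foldl_add_cons (xs : List String) (a : String) (s : List String) :
    xs.foldl PySem.Set.add (a :: s) =
      a :: xs.foldl (fun t x => if x = a then t else PySem.Set.add t x) s := by
  induction xs generalizing s with
  | nil => rfl
  | cons x rest ih => simp [add_cons, ih]

theorem add_ne_nil (t : List String) (x : String) (h : t ≠ []) : PySem.Set.add t x ≠ [] := by
  unfold PySem.Set.add
  split <;> simp [h]

theorem foldl_inner_ne_nil (a : String) (xs : List String) (t : List String) (h : t ≠ []) :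
    xs.foldl (fun t x => if x = a then t else PySem.Set.add t x) t ≠ [] := by
  induction xs generalizing t with
  | nil => exact h
  | cons x rest ih =>
    simp only [List.foldl_cons]
    by_cases hx : x = a
    · simpa [hx] using ih t h
    · exact ih _ (by simpa [hx] using add_ne_nil t x h)

theorem foldl_inner_nil_iff (a : String) (xs : List String) :
    (xs.foldl (fun t x => if x = a then t else PySem.Set.add t x) ([] : List String) = []) ↔
      xs.all (fun x => (x = a : Bool)) := by
  induction xs with
  | nil => simp
  | cons x rest ih =>
    by_cases hx : x = a
    · simpa [hx] using ih
    · have hadd : PySem.Set.add ([] : List String) x = [x] := by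
        simp [PySem.Set.add, PySem.Set.contains]
      simp only [List.foldl_cons, if_neg hx, hadd, List.all_cons]
      constructor
      · intro h; exact absurd h (foldl_inner_ne_nil a rest [x] (by simp))
      · intro h
        simp [hx] at h

-- A's answer and B's answer computed from the filtered posture list coincide
theorem main_eq (xs : List String) :
    (match PySem.Set.ofList xs with
      | [] => ""
      | [v] => v
      | _ => "mixed") =
    (match xs.foldl pvG (none, false) with
      | (none, _) => ""
      | (some v, m) => if m then "mixed" else v) := by
  cases xs with
  | nil => rfl
  | cons x rest =>
    have hA : PySem.Set.ofList (x :: rest) =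
        x :: rest.foldl (fun t y => if y = x then t else PySem.Set.add t y) [] := by
      have h0 : PySem.Set.ofList (x :: rest) = rest.foldl PySem.Set.add [x] := by
        simp [PySem.Set.ofList_eq_foldl, PySem.Set.add, PySem.Set.contains]
      rw [h0, foldl_add_cons]
    have hB : (x :: rest).foldl pvG (none, false) =
        (some x, rest.any (fun p => (p ≠ x : Bool))) := by
      simp [pvG, foldG_some]
    rw [hA, hB]
    by_cases h : rest.all (fun y => (y = x : Bool))
    · have h1 : rest.foldl (fun t y => if y = x then t else PySem.Set.add t y) [] = [] :=
        (foldl_inner_nil_iff x rest).mpr h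
      have h2 : rest.any (fun p => (p ≠ x : Bool)) = false := by
        simp only [List.all_eq_true] at h
        simp only [List.any_eq_false]
        intro p hp
        simpa using h p hp
      rw [h1, h2]
      simp
    · have h1 : rest.foldl (fun t y => if y = x then t else PySem.Set.add t y) [] ≠ [] := by
        intro hc; exact h ((foldl_inner_nil_iff x rest).mp hc)
      have h2 : rest.any (fun p => (p ≠ x : Bool)) = true := by
        rcases List.all_eq_false.mp (Bool.eq_false_iff.mpr h) with ⟨p, hp, hpe⟩
        exact List.any_eq_true.mpr ⟨p, hp, by simpa using hpe⟩
      rw [h2]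
      cases hrest : rest.foldl (fun t y => if y = x then t else PySem.Set.add t y) [] with
      | nil => exact absurd hrest h1
      | cons b t => simp

-- ===== VERDICT (by name: the statement is the Claim_ definition above) =====
theorem aggregate_trust_boundary_audit_posture_py_spec : Claim_equal_aggregate_trust_boundary_audit_posture_py := by
  intro items _
  unfold Spec_aggregate_trust_boundary_audit_posture_py
  unfold aggregate_trust_boundary_audit_posture_py aggregate_trust_boundary_audit_posture_py_alt
  rw [stepB_eq, foldB_to_list]
  exact main_eq (items.filterMap pvF)
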